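-- pv_equiv track=rewrite | github.com/Laz4rz/mup-abc | examples/MLP/mlp.py | chunk_jobs
-- ===== SOURCE A (Python) =====
-- def chunk_jobs(jobs, n_chunks):
--     """Split a list of jobs into n_chunks as evenly as possible, tagging each job with a unique index."""
--     chunk_sizes = [len(jobs) // n_chunks] * n_chunks
--     for i in range(len(jobs) % n_chunks):
--         chunk_sizes[i] += 1
--
--     chunks = []
--     start = 0
--     idx = 0
--     for size in chunk_sizes:
--         chunk = []
--         for job in jobs[start:start + size]:
--             chunk.append((idx, job[0], job[1]))  # actually tag the job
--             idx += 1
--         chunks.append(chunk)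
--         start += size
--
--     return chunks
-- ===== SOURCE B (Python) =====
-- def chunk_jobs(jobs, n_chunks):
--     """Split a list of jobs into n_chunks as evenly as possible, tagging each job with a unique index."""
--     tagged = [(i, a, b) for i, (a, b) in enumerate(jobs)]
--     chunks = []
--     k = n_chunks
--     while k > 0:
--         size = -(-len(tagged) // k)  # ceiling division: this chunk's fair share of what remains
--         chunks.append(tagged[:size])
--         tagged = tagged[size:]
--         k -= 1
--     return chunks
-- ===== Notes on version B (the rewrite author's own statement) =====
-- stated objective: alternative
-- what changed: B replaces A's size-list construction (replicate len//n then bump the first len%n entries, then a nested tagging loop with a running start and idx) by a greedy carve loop: tag all jobs once, then while k > 0 carve off the ceiling share ceil(len(rest)/k) of the remaining tagged list and decrement k, with no size list and no modulo/index bookkeeping.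
import Mathlib
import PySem

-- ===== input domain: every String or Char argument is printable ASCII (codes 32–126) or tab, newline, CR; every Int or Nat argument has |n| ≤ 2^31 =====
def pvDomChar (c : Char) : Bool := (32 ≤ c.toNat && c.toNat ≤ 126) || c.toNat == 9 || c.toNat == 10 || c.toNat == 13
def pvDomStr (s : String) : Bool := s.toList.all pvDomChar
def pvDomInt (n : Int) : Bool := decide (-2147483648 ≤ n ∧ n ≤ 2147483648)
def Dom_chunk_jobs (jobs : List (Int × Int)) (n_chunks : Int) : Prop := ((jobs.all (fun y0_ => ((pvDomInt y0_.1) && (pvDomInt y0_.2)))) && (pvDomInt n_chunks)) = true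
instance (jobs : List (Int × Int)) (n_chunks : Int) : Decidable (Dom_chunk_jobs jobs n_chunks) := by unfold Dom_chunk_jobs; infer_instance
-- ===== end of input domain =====

-- B replaces A's size-list-plus-running-counters partition by a recursive greedy carve: tag all jobs
-- once, then repeatedly take the ceiling share of the remaining jobs while decrementing the chunk count.


-- ===== PORT A =====
def chunk_jobs (jobs : List (Int × Int)) (n_chunks : Int) : List (List (Int × Int × Int)) :=
  -- chunk_sizes = [len(jobs) // n_chunks] * n_chunks
  let cs0 : List Int := List.replicate n_chunks.toNat (PySem.Int.floordiv (jobs.length : Int) n_chunks)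
  -- for i in range(len(jobs) % n_chunks): chunk_sizes[i] += 1
  let chunk_sizes : List Int :=
    (PySem.List.pyRange 0 (PySem.Int.mod (jobs.length : Int) n_chunks) 1).foldl
      (fun cs i => PySem.List.pySetD cs i (PySem.List.pyGetD cs i 0 + 1)) cs0
  -- for size in chunk_sizes: inner loop over jobs[start:start+size] appending (idx, job[0], job[1])
  let res : List (List (Int × Int × Int)) × Int × Int :=
    chunk_sizes.foldl
      (fun acc size =>
        let inner : List (Int × Int × Int) × Int :=
          (PySem.List.slice jobs (some acc.2.1) (some (acc.2.1 + size))).foldl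
            (fun p job => (p.1 ++ [(p.2, job.1, job.2)], p.2 + 1)) ([], acc.2.2)
        (acc.1 ++ [inner.1], acc.2.1 + size, inner.2))
      ([], 0, 0)
  res.1

-- ===== PORT B =====
-- while k > 0: carve off the ceiling share tagged[:size], tagged = tagged[size:], k -= 1
def pvGoLoop (tagged : List (Int × Int × Int)) (k : Int) (chunks : List (List (Int × Int × Int))) :
    List (List (Int × Int × Int)) :=
  if k ≤ 0 then chunks
  else
    -- size = -(-len(tagged) // k)
    let size : Int := -(PySem.Int.floordiv (-(tagged.length : Int)) k)
    pvGoLoop (PySem.List.slice tagged (some size)) (k - 1)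
      (chunks ++ [PySem.List.slice tagged none (some size)])
termination_by k.toNat
decreasing_by omega

def chunk_jobs_alt (jobs : List (Int × Int)) (n_chunks : Int) : List (List (Int × Int × Int)) :=
  -- tagged = [(i, a, b) for i, (a, b) in enumerate(jobs)]; chunks = []; while loop above
  pvGoLoop ((PySem.List.enumerate jobs 0).map (fun p => (p.1, p.2.1, p.2.2))) n_chunks []

-- ===== PRECONDITION & SPEC =====
-- Pre_ excludes exactly n_chunks = 0, where the Python A raises ZeroDivisionError.
def Pre_chunk_jobs (jobs : List (Int × Int)) (n_chunks : Int) : Prop := n_chunks ≠ 0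
instance (jobs : List (Int × Int)) (n_chunks : Int) : Decidable (Pre_chunk_jobs jobs n_chunks) := by unfold Pre_chunk_jobs; infer_instance
def pvWitness_chunk_jobs : (List (Int × Int)) × Int := ([(1, 2), (3, 4), (5, 6)], 2)

def Spec_chunk_jobs (jobs : List (Int × Int)) (n_chunks : Int) (out : List (List (Int × Int × Int))) : Prop := out = chunk_jobs_alt jobs n_chunks
instance (jobs : List (Int × Int)) (n_chunks : Int) (out : List (List (Int × Int × Int))) : Decidable (Spec_chunk_jobs jobs n_chunks out) := by unfold Spec_chunk_jobs; infer_instance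

-- ===== CLAIM (what is proved, stated in full; the proofs are below) =====
def Claim_equal_chunk_jobs : Prop := ∀ (jobs : List (Int × Int)) (n_chunks : Int), Dom_chunk_jobs jobs n_chunks → Pre_chunk_jobs jobs n_chunks → Spec_chunk_jobs jobs n_chunks (chunk_jobs jobs n_chunks)
-- ===== LEMMAS AND PROOFS =====

-- cons-form of the greedy carve loop (proof helper)
def pvGo (tagged : List (Int × Int × Int)) (k : Int) : List (List (Int × Int × Int)) :=
  if k ≤ 0 then []
  else
    let size : Int := -(PySem.Int.floordiv (-(tagged.length : Int)) k)
    PySem.List.slice tagged none (some size) :: pvGo (PySem.List.slice tagged (some size)) (k - 1)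
termination_by k.toNat
decreasing_by omega

-- the accumulator loop is the cons-form carve
lemma pvGoLoop_go (k : Nat) : ∀ (t : List (Int × Int × Int)) (acc : List (List (Int × Int × Int))),
    pvGoLoop t (k : Int) acc = acc ++ pvGo t (k : Int) := by
  induction k with
  | zero =>
    intro t acc
    rw [pvGoLoop, pvGo]
    simp
  | succ k ih =>
    intro t acc
    rw [pvGoLoop, pvGo]
    have hneg : ¬ (((k + 1 : Nat) : Int) ≤ 0) := by push_cast; omega
    rw [if_neg hneg, if_neg hneg]
    show pvGoLoop (PySem.List.slice t (some (-(PySem.Int.floordiv (-(t.length : Int)) ((k + 1 : Nat) : Int)))))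
          (((k + 1 : Nat) : Int) - 1)
          (acc ++ [PySem.List.slice t none (some (-(PySem.Int.floordiv (-(t.length : Int)) ((k + 1 : Nat) : Int))))])
        = acc ++ (PySem.List.slice t none (some (-(PySem.Int.floordiv (-(t.length : Int)) ((k + 1 : Nat) : Int))))
            :: pvGo (PySem.List.slice t (some (-(PySem.Int.floordiv (-(t.length : Int)) ((k + 1 : Nat) : Int)))))
                 (((k + 1 : Nat) : Int) - 1))
    have hstep : ((k + 1 : Nat) : Int) - 1 = ((k : Nat) : Int) := by push_cast; ring
    rw [hstep, ih]
    simp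

-- the tagging function shared by both proofs
def pvTag (p : Int × Int × Int) : Int × Int × Int := (p.1, p.2.1, p.2.2)

-- A's per-chunk step (the lambda in chunk_jobs's main fold)
def pvStepA (jobs : List (Int × Int)) (acc : List (List (Int × Int × Int)) × Int × Int) (size : Int) :
    List (List (Int × Int × Int)) × Int × Int :=
  let inner : List (Int × Int × Int) × Int :=
    (PySem.List.slice jobs (some acc.2.1) (some (acc.2.1 + size))).foldl
      (fun p job => (p.1 ++ [(p.2, job.1, job.2)], p.2 + 1)) ([], acc.2.2)
  (acc.1 ++ [inner.1], acc.2.1 + size, inner.2)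

-- an intermediate carving step used only in the proofs (absolute start positions)
def pvStepB (tagged : List (Int × Int × Int)) (acc : List (List (Int × Int × Int)) × Int) (size : Int) :
    List (List (Int × Int × Int)) × Int :=
  (acc.1 ++ [PySem.List.slice tagged (some acc.2) (some (acc.2 + size))], acc.2 + size)

-- carving a list by a list of (nonnegative) sizes, take/drop form
def pvCarve (t : List (Int × Int × Int)) : List Int → List (List (Int × Int × Int))
  | [] => []
  | s :: rest => t.take s.toNat :: pvCarve (t.drop s.toNat) rest

-- the balanced size list, Nat arithmetic ([] for k = 0)
def pvSizesN (m k : Nat) : List Int :=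
  if k = 0 then []
  else List.replicate (m % k) (((m / k : Nat) : Int) + 1) ++ List.replicate (k - m % k) ((m / k : Nat) : Int)

-- A's bump loop on a replicate list yields the closed-form size list
lemma bump_replicate (r m : Nat) (x : Int) (h : r ≤ m) :
    (PySem.List.pyRange 0 (r : Int) 1).foldl
      (fun cs i => PySem.List.pySetD cs i (PySem.List.pyGetD cs i 0 + 1)) (List.replicate m x)
    = List.replicate r (x + 1) ++ List.replicate (m - r) x := by
  induction r with
  | zero => simp [PySem.List.pyRange_one_eq_nil]
  | succ k ih =>
    have hk : k ≤ m := Nat.le_of_succ_le h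
    have hsplit : (PySem.List.pyRange 0 ((k + 1 : Nat) : Int) 1)
        = PySem.List.pyRange 0 (k : Int) 1 ++ [(k : Int)] := by
      have := PySem.List.pyRange_one_succ_right (a := 0) (b := (k : Int)) (by exact_mod_cast Nat.zero_le k)
      push_cast
      simpa using this
    rw [hsplit, List.foldl_append, ih hk]
    have hget : PySem.List.pyGetD (List.replicate k (x + 1) ++ List.replicate (m - k) x) ((k : Nat) : Int) 0 = x := by
      rw [PySem.List.pyGetD_natCast]
      rw [List.getD_eq_getElem?_getD, List.getElem?_append_right (by simp)]
      have hlt : 0 < m - k := by omega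
      simp [hlt]
    simp only [List.foldl_cons, List.foldl_nil, hget, PySem.List.pySetD_natCast]
    rw [List.set_append_right _ _ (by simp)]
    have h2 : m - k = (m - (k + 1)) + 1 := by omega
    rw [h2, List.replicate_succ]
    have h3 : List.replicate (k + 1) (x + 1) = List.replicate k (x + 1) ++ [x + 1] :=
      List.replicate_succ' ..
    rw [h3]
    simp

-- A's inner tagging loop is enumerate-then-map
lemma inner_loop (xs : List (Int × Int)) (c : List (Int × Int × Int)) (i : Int) :
    xs.foldl (fun p job => (p.1 ++ [(p.2, job.1, job.2)], p.2 + 1)) (c, i)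
    = (c ++ (PySem.List.enumerate xs i).map pvTag, i + xs.length) := by
  induction xs generalizing c i with
  | nil => simp [PySem.List.enumerate_nil]
  | cons y ys ih =>
    simp only [List.foldl_cons, ih, PySem.List.enumerate_cons, List.map_cons, Prod.mk.injEq]
    refine ⟨by simp [pvTag], by push_cast [List.length_cons]; omega⟩

-- enumerate commutes with drop (index shifted by the clamped drop amount)
lemma enumerate_drop (xs : List (Int × Int)) (a : Nat) (s : Int) :
    (PySem.List.enumerate xs s).drop a = PySem.List.enumerate (xs.drop a) (s + (min a xs.length : Nat)) := by
  induction xs generalizing a s with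
  | nil => simp [PySem.List.enumerate_nil]
  | cons y ys ih =>
    cases a with
    | zero => simp [PySem.List.enumerate_cons]
    | succ b =>
      simp only [PySem.List.enumerate_cons, List.drop_succ_cons, ih]
      congr 1
      have hmin : min (b + 1) (ys.length + 1) = (min b ys.length) + 1 := by omega
      push_cast [List.length_cons, hmin]
      ring

-- enumerate commutes with take
lemma enumerate_take (xs : List (Int × Int)) (k : Nat) (s : Int) :
    (PySem.List.enumerate xs s).take k = PySem.List.enumerate (xs.take k) s := by
  induction xs generalizing k s with
  | nil => simp [PySem.List.enumerate_nil]
  | cons y ys ih =>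
    cases k with
    | zero => simp [PySem.List.enumerate_nil]
    | succ j => simp [PySem.List.enumerate_cons, ih]

-- a slice of the tagged list is the tagged slice, with tags starting at the clamped start
lemma slice_tagged (jobs : List (Int × Int)) (start size : Int) (h0 : 0 ≤ start) (hs : 0 ≤ size) :
    PySem.List.slice ((PySem.List.enumerate jobs 0).map pvTag) (some start) (some (start + size))
    = (PySem.List.enumerate (PySem.List.slice jobs (some start) (some (start + size)))
        (min start (jobs.length : Int))).map pvTag := by
  rw [PySem.List.slice_toNat _ h0 (by omega), PySem.List.slice_toNat _ h0 (by omega)]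
  rw [← List.map_drop, ← List.map_take]
  rw [enumerate_drop, enumerate_take]
  congr 2
  have h1 : min start (jobs.length : Int) = ((min start.toNat jobs.length : Nat) : Int) := by
    push_cast; omega
  simp [h1]

-- the main loop: A's fold with its running idx equals carving by absolute positions,
-- under the invariant idx = min start len (sizes nonnegative, start nonnegative)
lemma main_loop (jobs : List (Int × Int)) (sizes : List Int)
    (hsz : ∀ s ∈ sizes, 0 ≤ s) (c : List (List (Int × Int × Int))) (start idx : Int)
    (h0 : 0 ≤ start) (hidx : idx = min start (jobs.length : Int)) :
    (sizes.foldl (pvStepA jobs) (c, start, idx)).1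
    = (sizes.foldl (pvStepB ((PySem.List.enumerate jobs 0).map pvTag)) (c, start)).1 := by
  induction sizes generalizing c start idx with
  | nil => rfl
  | cons s rest ih =>
    have hs : 0 ≤ s := hsz s (List.mem_cons_self ..)
    have hrest : ∀ t ∈ rest, 0 ≤ t := fun t ht => hsz t (List.mem_cons_of_mem _ ht)
    have hlenA : (PySem.List.slice jobs (some start) (some (start + s))).length
        = min s.toNat (jobs.length - start.toNat) := by
      rw [PySem.List.slice_toNat _ h0 (by omega)]
      simp
      omega
    have hstep : pvStepA jobs (c, start, idx) s
        = (c ++ [PySem.List.slice ((PySem.List.enumerate jobs 0).map pvTag) (some start) (some (start + s))],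
           start + s, min (start + s) (jobs.length : Int)) := by
      simp only [pvStepA, inner_loop, List.nil_append]
      rw [slice_tagged jobs start s h0 hs, hidx]
      refine congrArg₂ _ rfl (congrArg _ ?_)
      rw [hlenA]
      push_cast
      omega
    rw [List.foldl_cons, List.foldl_cons, hstep]
    exact ih hrest _ (start + s) _ (by omega) rfl

-- absolute-position carving (pvStepB fold) equals take/drop carving
lemma foldB_carve (t : List (Int × Int × Int)) (sizes : List Int)
    (hsz : ∀ s ∈ sizes, 0 ≤ s) (c : List (List (Int × Int × Int))) (start : Int) (h0 : 0 ≤ start) :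
    (sizes.foldl (pvStepB t) (c, start)).1 = c ++ pvCarve (t.drop start.toNat) sizes := by
  induction sizes generalizing c start with
  | nil => simp [pvCarve]
  | cons s rest ih =>
    have hs : 0 ≤ s := hsz s (List.mem_cons_self ..)
    have hrest : ∀ x ∈ rest, 0 ≤ x := fun x hx => hsz x (List.mem_cons_of_mem _ hx)
    rw [List.foldl_cons]
    have hstep : pvStepB t (c, start) s
        = (c ++ [(t.drop start.toNat).take s.toNat], start + s) := by
      simp only [pvStepB]
      rw [PySem.List.slice_toNat _ h0 (by omega)]
      have : (start + s).toNat - start.toNat = s.toNat := by omega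
      rw [this]
    rw [hstep, ih hrest _ (start + s) (by omega)]
    have hdd : t.drop (start + s).toNat = (t.drop start.toNat).drop s.toNat := by
      rw [List.drop_drop]
      congr 1
      omega
    rw [hdd, pvCarve]
    simp

-- ceiling division -(-m // (k+1)) in closed Nat form
lemma ceil_div (m k : Nat) :
    -(PySem.Int.floordiv (-(m : Int)) ((k : Int) + 1))
    = ((m / (k + 1) + (if m % (k + 1) = 0 then 0 else 1) : Nat) : Int) := by
  have hpos : (0 : Int) < (k : Int) + 1 := by omega
  rw [PySem.Int.neg_floordiv_neg_eq_iff_of_pos hpos]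
  obtain ⟨b, r, hm, hrlt, hr0, hb, hr⟩ :
      ∃ b r : Int, (m : Int) = ((k : Int) + 1) * b + r ∧ r < (k : Int) + 1 ∧ 0 ≤ r
        ∧ b = ((m / (k + 1) : Nat) : Int) ∧ r = ((m % (k + 1) : Nat) : Int) :=
    ⟨_, _, by exact_mod_cast (Nat.div_add_mod m (k + 1)).symm,
      by exact_mod_cast Nat.mod_lt m k.succ_pos, Int.natCast_nonneg _, rfl, rfl⟩
  by_cases h : m % (k + 1) = 0
  · have hrz : r = 0 := by rw [hr, h]; simp
    have hcast : ((m / (k + 1) + (if m % (k + 1) = 0 then 0 else 1) : Nat) : Int) = b := by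
      rw [if_pos h, Nat.add_zero, ← hb]
    rw [hcast]
    constructor
    · have e : (b - 1) * ((k : Int) + 1) = ((k : Int) + 1) * b - ((k : Int) + 1) := by ring
      rw [e]; linarith [hm, hrz, hpos]
    · have e : b * ((k : Int) + 1) = ((k : Int) + 1) * b := by ring
      rw [e]; linarith [hm, hrz]
  · have hrpos : (0 : Int) < r := by
      rw [hr]; exact_mod_cast Nat.pos_of_ne_zero h
    have hcast : ((m / (k + 1) + (if m % (k + 1) = 0 then 0 else 1) : Nat) : Int) = b + 1 := by
      rw [if_neg h, Nat.cast_add, Nat.cast_one, ← hb]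
    rw [hcast]
    constructor
    · have e : (b + 1 - 1) * ((k : Int) + 1) = ((k : Int) + 1) * b := by ring
      rw [e]; linarith [hm, hrpos]
    · have e : (b + 1) * ((k : Int) + 1) = ((k : Int) + 1) * b + ((k : Int) + 1) := by ring
      rw [e]; linarith [hm, hrlt]

-- the size list unfolds one greedy ceiling step
lemma sizesN_cons (m k : Nat) :
    pvSizesN m (k + 1)
    = ((m / (k + 1) + (if m % (k + 1) = 0 then 0 else 1) : Nat) : Int)
      :: pvSizesN (m - (m / (k + 1) + (if m % (k + 1) = 0 then 0 else 1))) k := by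
  obtain ⟨b, hb⟩ : ∃ b, m / (k + 1) = b := ⟨_, rfl⟩
  obtain ⟨r, hr⟩ : ∃ r, m % (k + 1) = r := ⟨_, rfl⟩
  have hdm : (k + 1) * b + r = m := by rw [← hb, ← hr]; exact Nat.div_add_mod m (k + 1)
  have hlt : r < k + 1 := hr ▸ Nat.mod_lt m k.succ_pos
  have hexp : (k + 1) * b = k * b + b := by ring
  by_cases h : r = 0
  · rw [hr, if_pos h, hb]
    simp only [Nat.add_zero]
    have hsub : m - b = k * b := by omega
    rcases Nat.eq_zero_or_pos k with hk | hk
    · subst hk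
      have hm0 : m = b := by omega
      subst hm0
      simp [pvSizesN, Nat.mod_one, Nat.div_one]
    · have hkne : ¬ (k = 0) := by omega
      have hdiv : (k * b) / k = b := Nat.mul_div_cancel_left b hk
      have hmod : (k * b) % k = 0 := Nat.mul_mod_right k b
      rw [hsub]
      simp only [pvSizesN, if_neg (Nat.succ_ne_zero k), if_neg hkne]
      rw [hb, hr, h, hdiv, hmod]
      simp [List.replicate_succ]
  · rw [hr, if_neg h, hb]
    have hrpos : 0 < r := Nat.pos_of_ne_zero h
    have hkpos : 0 < k := by
      rcases Nat.eq_zero_or_pos k with hk | hk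
      · exfalso; apply h; rw [← hr, hk]; exact Nat.mod_one m
      · exact hk
    have hkne : ¬ (k = 0) := by omega
    have hm' : m - (b + 1) = k * b + (r - 1) := by omega
    have hdiv : (k * b + (r - 1)) / k = b := by
      rw [Nat.mul_add_div hkpos, Nat.div_eq_of_lt (by omega : r - 1 < k), Nat.add_zero]
    have hmod : (k * b + (r - 1)) % k = r - 1 := by
      rw [Nat.mul_add_mod]
      exact Nat.mod_eq_of_lt (by omega)
    rw [hm']
    simp only [pvSizesN, if_neg (Nat.succ_ne_zero k), if_neg hkne]
    rw [hb, hr, hdiv, hmod]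
    rw [show ((b + 1 : Nat) : Int) = (b : Int) + 1 from by rw [Nat.cast_add, Nat.cast_one]]
    have hrep : List.replicate r ((b : Int) + 1)
        = ((b : Int) + 1) :: List.replicate (r - 1) ((b : Int) + 1) := by
      conv_lhs => rw [show r = (r - 1) + 1 by omega]
      rw [List.replicate_succ]
    rw [hrep, show k + 1 - r = k - (r - 1) by omega]
    simp

-- B's recursion computes take/drop carving by the balanced size list
lemma pvGo_carve (k : Nat) : ∀ t : List (Int × Int × Int), pvGo t (k : Int) = pvCarve t (pvSizesN t.length k) := by
  induction k with
  | zero =>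
    intro t
    rw [pvGo]
    simp [pvSizesN, pvCarve]
  | succ k ih =>
    intro t
    rw [pvGo]
    have hneg : ¬ (((k + 1 : Nat) : Int) ≤ 0) := by push_cast; omega
    rw [if_neg hneg]
    have hdivisor : ((k + 1 : Nat) : Int) = (k : Int) + 1 := by push_cast; ring
    obtain ⟨q, hq⟩ : ∃ q, t.length / (k + 1) + (if t.length % (k + 1) = 0 then 0 else 1) = q := ⟨_, rfl⟩
    have hsize : -(PySem.Int.floordiv (-(t.length : Int)) ((k + 1 : Nat) : Int)) = ((q : Nat) : Int) := by
      rw [hdivisor, ceil_div t.length k, hq]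
    rw [hsize]
    show PySem.List.slice t none (some ((q : Nat) : Int))
          :: pvGo (PySem.List.slice t (some ((q : Nat) : Int))) (((k + 1 : Nat) : Int) - 1)
        = pvCarve t (pvSizesN t.length (k + 1))
    rw [PySem.List.slice_to t (Int.natCast_nonneg q), PySem.List.slice_from t (Int.natCast_nonneg q)]
    rw [Int.toNat_natCast]
    have hstep : ((k + 1 : Nat) : Int) - 1 = ((k : Nat) : Int) := by push_cast; ring
    rw [hstep, ih (t.drop q), List.length_drop]
    rw [sizesN_cons t.length k, hq]
    conv_rhs => rw [pvCarve]
    rw [Int.toNat_natCast]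

-- ===== VERDICT (by name: the statements are the Claim_ definitions above) =====
theorem chunk_jobs_spec : Claim_equal_chunk_jobs := by
  intro jobs n hdom hpre
  unfold Spec_chunk_jobs chunk_jobs chunk_jobs_alt
  simp only []
  rw [show (fun p : Int × Int × Int => (p.1, p.2.1, p.2.2)) = pvTag from rfl]
  set len : Int := (jobs.length : Int) with hlen
  have hlen0 : 0 ≤ len := by simp [hlen]
  set tagged : List (Int × Int × Int) := (PySem.List.enumerate jobs 0).map pvTag with htag
  have htlen : tagged.length = jobs.length := by
    simp [htag, PySem.List.length_enumerate]
  rcases lt_or_gt_of_ne hpre with hneg | hpos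
  · -- n < 0: A's size list is empty, B's recursion stops at once; both return []
    have h1 : n.toNat = 0 := by omega
    have hm := PySem.Int.mod_neg_bounds len hneg
    have h2 : PySem.List.pyRange 0 (PySem.Int.mod len n) 1 = [] :=
      PySem.List.pyRange_one_eq_nil (by omega)
    have hB : pvGoLoop tagged n [] = [] := by rw [pvGoLoop, if_pos (by omega)]
    rw [hB, h1, h2]
    simp
  · -- n > 0
    have hb0 : 0 ≤ PySem.Int.floordiv len n := by
      rw [PySem.Int.floordiv_eq_ediv_of_pos hpos]
      exact Int.ediv_nonneg hlen0 (by omega)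
    have hm0 : 0 ≤ PySem.Int.mod len n := PySem.Int.mod_nonneg len hpos
    have hmlt : PySem.Int.mod len n < n := PySem.Int.mod_lt len hpos
    set rem := PySem.Int.mod len n with hrem
    set base := PySem.Int.floordiv len n with hbase
    have hcast : rem = ((rem.toNat : Nat) : Int) := by omega
    have hsizes : (PySem.List.pyRange 0 rem 1).foldl
        (fun cs i => PySem.List.pySetD cs i (PySem.List.pyGetD cs i 0 + 1)) (List.replicate n.toNat base)
        = List.replicate rem.toNat (base + 1) ++ List.replicate (n - rem).toNat base := by
      rw [hcast, bump_replicate rem.toNat n.toNat base (by omega)]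
      congr 2
      omega
    rw [hsizes]
    set sizes : List Int := List.replicate rem.toNat (base + 1) ++ List.replicate (n - rem).toNat base with hsz
    have hnn : ∀ s ∈ sizes, 0 ≤ s := by
      intro s hsmem
      rcases List.mem_append.mp hsmem with h | h
      · have := List.eq_of_mem_replicate h; omega
      · have := List.eq_of_mem_replicate h; omega
    -- A's result is the carve of the tagged list by 'sizes'
    have hA : (sizes.foldl (pvStepA jobs) ([], 0, 0)).1 = pvCarve tagged sizes := by
      rw [main_loop jobs sizes hnn [] 0 0 le_rfl (by omega)]
      rw [foldB_carve tagged sizes hnn [] 0 le_rfl]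
      simp
    -- B's result is the carve of the tagged list by the same size list
    have hncast : n = ((n.toNat : Nat) : Int) := by omega
    have hB : pvGoLoop tagged n [] = pvCarve tagged (pvSizesN jobs.length n.toNat) := by
      conv_lhs => rw [hncast]
      rw [pvGoLoop_go n.toNat tagged [], List.nil_append, pvGo_carve n.toNat tagged, htlen]
    have hsame : pvSizesN jobs.length n.toNat = sizes := by
      have hkne : ¬ (n.toNat = 0) := by omega
      simp only [pvSizesN, hkne, if_false, hsz]
      have hb : base = ((jobs.length / n.toNat : Nat) : Int) := by
        rw [hbase, hlen]
        conv_lhs => rw [hncast]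
        exact_mod_cast PySem.Int.floordiv_natCast jobs.length n.toNat
      have hr : rem = ((jobs.length % n.toNat : Nat) : Int) := by
        rw [hrem, hlen]
        conv_lhs => rw [hncast]
        exact_mod_cast PySem.Int.mod_natCast jobs.length n.toNat
      have hr1 : rem.toNat = jobs.length % n.toNat := by omega
      have hr2 : (n - rem).toNat = n.toNat - jobs.length % n.toNat := by omega
      rw [hr1, hr2, hb]
    rw [hB, hsame]
    exact hA
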